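-- pv_equiv track=rewrite | github.com/khuonggminhhoang/PYTHON_PTIT | so_smith.py | anlPrime
-- ===== SOURCE A (Python) =====
-- def anlPrime(n):
--     res = 0
--     i = 2
--     while i*i <= n:
--         cnt = 0
--         if n % i == 0 :
--             res += 1
--             if res > 3 : return 0
--             while n%i == 0:
--                 n //= i
--                 cnt += 1
--                 if cnt > 1: return 0
--         i += 1
--     if n > 1: res += 1
--     if res ==3 : return 1
--     return 0
-- ===== SOURCE B (Python) =====
-- def spf(n):
--     d = 2
--     while d * d <= n:
--         if n % d == 0:
--             return d
--         d += 1
--     return n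
--
--
-- def anlPrime(n):
--     if n < 2:
--         return 0
--     p = spf(n)
--     m = n // p
--     q = spf(m)
--     r = m // q
--     return 1 if p < q < r and spf(r) == r else 0
-- ===== Notes on version B (the rewrite author's own statement) =====
-- stated objective: alternative
-- what changed: B never counts prime factors or exponents and never factorizes completely: it extracts the three smallest prime factors p = spf(n), q = spf(n//p), r = (n//p)//q with a reusable smallest-prime-factor helper (restarting from 2 each time) and returns 1 iff p < q < r and r is prime (spf(r) == r), replacing A's single mutating loop with interleaved counters and early returns.
import Mathlib
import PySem

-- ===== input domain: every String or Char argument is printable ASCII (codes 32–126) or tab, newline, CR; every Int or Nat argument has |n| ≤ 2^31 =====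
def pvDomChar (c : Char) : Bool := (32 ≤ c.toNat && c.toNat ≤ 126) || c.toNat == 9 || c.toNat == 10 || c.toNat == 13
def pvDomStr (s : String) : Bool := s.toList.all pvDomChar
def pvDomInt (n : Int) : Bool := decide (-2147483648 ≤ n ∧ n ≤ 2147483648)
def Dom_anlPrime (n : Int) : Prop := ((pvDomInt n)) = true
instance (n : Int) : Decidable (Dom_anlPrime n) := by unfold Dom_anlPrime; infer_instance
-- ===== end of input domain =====

-- B replaces A's single mutating trial-division loop with interleaved counters and early
-- returns by a different decomposition: it extracts the three smallest prime factors
-- p = spf(n), q = spf(n//p), r = (n//p)//q with a reusable smallest-prime-factor helper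
-- and returns 1 iff p < q < r and r is prime (objective: alternative).

-- ===== PORT A =====
-- inner 'while n%i==0: n//=i; cnt+=1; if cnt>1: return 0' — none = the 'return 0' exit
-- port-support: facts the loops' termination cites (kept as named lemmas so the
-- recursive definitions carry only small proof terms)
theorem pv_aInner_dec (cnt : Int) (h : ¬ cnt + 1 > 1) :
    (2 - (cnt + 1)).toNat < (2 - cnt).toNat := by omega

def aInner (n i cnt : Int) : Option Int :=
  let n' := PySem.Int.floordiv n i
  let cnt' := cnt + 1
  if h : cnt' > 1 then none
  else if PySem.Int.mod n' i = 0 then aInner n' i cnt'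
  else some n'
termination_by (2 - cnt).toNat
decreasing_by exact pv_aInner_dec cnt h

theorem pv_floordiv_lt (n i : Int) (hn : 0 < n) (hi : 2 ≤ i) :
    PySem.Int.floordiv n i < n := by
  rw [PySem.Int.floordiv_lt_iff_lt_mul (by omega)]
  calc n = n * 1 := (mul_one n).symm
    _ < n * i := by
      exact mul_lt_mul_of_pos_left (by omega) hn

theorem pv_aInner_zero (n i : Int) :
    aInner n i 0 = (if PySem.Int.mod (PySem.Int.floordiv n i) i = 0 then none
                    else some (PySem.Int.floordiv n i)) := by
  rw [aInner]
  norm_num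
  split
  · rw [aInner]; norm_num
  · rfl

theorem pv_i_le_n (n i : Int) (h2 : 2 ≤ i) (hle : i * i ≤ n) : i ≤ n :=
  le_trans (le_mul_of_one_le_left (by omega) (by omega)) hle

theorem pv_aLoop_dec1 (n i n' : Int) (h2 : 2 ≤ i) (hle : i * i ≤ n)
    (e : aInner n i 0 = some n') : (n' + 1 - (i + 1)).toNat < (n + 1 - i).toNat := by
  rw [pv_aInner_zero] at e
  split at e
  · exact absurd e (by simp)
  · have h3 := pv_i_le_n n i h2 hle
    have h1 := pv_floordiv_lt n i (by omega) h2
    simp only [Option.some.injEq] at e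
    omega

theorem pv_aLoop_dec2 (n i : Int) (h2 : 2 ≤ i) (hle : i * i ≤ n) :
    (n + 1 - (i + 1)).toNat < (n + 1 - i).toNat := by
  have h3 := pv_i_le_n n i h2 hle
  omega

-- outer while of A; the '2 ≤ i' conjunct is a totality guard only (i starts at 2 and increments)
def aLoop (n i res : Int) : Int :=
  if h : 2 ≤ i ∧ i * i ≤ n then
    if PySem.Int.mod n i = 0 then
      if res + 1 > 3 then 0
      else
        match e : aInner n i 0 with
        | none => 0
        | some n' => aLoop n' (i + 1) (res + 1)
    else aLoop n (i + 1) res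
  else if (if n > 1 then res + 1 else res) = 3 then 1 else 0
termination_by (n + 1 - i).toNat
decreasing_by
  · exact pv_aLoop_dec1 n i n' h.1 h.2 e
  · exact pv_aLoop_dec2 n i h.1 h.2

def anlPrime (n : Int) : Int := aLoop n 2 0

-- ===== PORT B =====
-- 'while d*d <= n: if n % d == 0: return d; d += 1 / return n'; '2 ≤ d' is a totality guard only
def spfLoop (n d : Int) : Int :=
  if h : 2 ≤ d ∧ d * d ≤ n then
    if PySem.Int.mod n d = 0 then d
    else spfLoop n (d + 1)
  else n
termination_by (n + 1 - d).toNat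
decreasing_by exact pv_aLoop_dec2 n d h.1 h.2

-- def spf(n): the loop starting at d = 2
def spf (n : Int) : Int := spfLoop n 2

def anlPrime_alt (n : Int) : Int :=
  if n < 2 then 0
  else
    let p := spf n
    let m := PySem.Int.floordiv n p
    let q := spf m
    let r := PySem.Int.floordiv m q
    if p < q ∧ q < r ∧ spf r = r then 1 else 0

-- ===== PRECONDITION & SPEC =====
def Spec_anlPrime (n : Int) (out : Int) : Prop := out = anlPrime_alt n
instance (n : Int) (out : Int) : Decidable (Spec_anlPrime n out) := by unfold Spec_anlPrime; infer_instance

-- ===== CLAIM (what is proved, stated in full; the proofs are below) =====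
def Claim_equal_anlPrime : Prop := ∀ (n : Int), Dom_anlPrime n → Spec_anlPrime n (anlPrime n)

-- ===== LEMMAS AND PROOFS =====

-- ---- characterisation of the smallest-prime-factor loop: it computes Nat.minFac ----

theorem pv_minFac_ge (N : ℕ) (d : Int) (h2 : 2 ≤ N)
    (H : ∀ j : ℕ, 2 ≤ j → (j : Int) < d → ¬ j ∣ N) : d ≤ (N.minFac : Int) := by
  by_contra h
  exact H N.minFac (Nat.minFac_prime (by omega)).two_le (not_le.mp h) (Nat.minFac_dvd N)

-- stop case: d*d > N and no divisor below d means minFac N = N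
theorem pv_spf_stop (N : ℕ) (d : Int) (hd : 2 ≤ d) (h1 : 1 ≤ N)
    (hg : ¬ d * d ≤ (N : Int))
    (H : ∀ j : ℕ, 2 ≤ j → (j : Int) < d → ¬ j ∣ N) :
    (N : Int) = (N.minFac : Int) := by
  rcases eq_or_lt_of_le h1 with h | h
  · rw [← h]; norm_num [Nat.minFac_one]
  · by_cases hp : N.Prime
    · rw [(Nat.prime_def_minFac.mp hp).2]
    · exfalso
      have hne1 : N ≠ 1 := by omega
      have hf := Nat.minFac_prime hne1
      have hsq : N.minFac ^ 2 ≤ N := Nat.minFac_sq_le_self (by omega) hp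
      have hge : d ≤ (N.minFac : Int) := pv_minFac_ge N d (by omega) H
      have hff : (N.minFac : Int) * (N.minFac : Int) ≤ (N : Int) := by
        exact_mod_cast (by nlinarith : N.minFac * N.minFac ≤ N)
      apply hg
      nlinarith [mul_le_mul hge hge (by omega : (0:Int) ≤ d) (by positivity)]

theorem pv_spfLoop_eq (k : ℕ) : ∀ (N : ℕ) (d : Int),
    ((N : Int) + 1 - d).toNat ≤ k → 2 ≤ d → 1 ≤ N →
    (∀ j : ℕ, 2 ≤ j → (j : Int) < d → ¬ j ∣ N) →
    spfLoop (N : Int) d = (N.minFac : Int) := by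
  induction k with
  | zero =>
    intro N d hk hd h1 H
    have hg : ¬ d * d ≤ (N : Int) := by
      intro hc
      have := pv_i_le_n _ _ hd hc
      omega
    rw [spfLoop, dif_neg (fun hc => hg hc.2)]
    exact pv_spf_stop N d hd h1 hg H
  | succ k ih =>
    intro N d hk hd h1 H
    by_cases hg : d * d ≤ (N : Int)
    · rw [spfLoop, dif_pos ⟨hd, hg⟩]
      have h4 : (4 : Int) ≤ (N : Int) := by nlinarith
      have hN2 : 2 ≤ N := by exact_mod_cast (by omega : (2 : Int) ≤ (N : Int))
      by_cases hm : PySem.Int.mod (N : Int) d = 0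
      · rw [if_pos hm]
        have hdvd : d ∣ (N : Int) := (PySem.Int.mod_eq_zero_iff_dvd _ _).mp hm
        have hiD : ((d.toNat : ℕ) : Int) = d := Int.toNat_of_nonneg (by omega)
        have hDdvd : d.toNat ∣ N := by
          rw [← Int.natCast_dvd_natCast, hiD]; exact hdvd
        have hle : N.minFac ≤ d.toNat := Nat.minFac_le_of_dvd (by omega) hDdvd
        have hge : d ≤ (N.minFac : Int) := pv_minFac_ge N d hN2 H
        omega
      · rw [if_neg hm]
        refine ih N (d + 1) (by omega) (by omega) h1 ?_
        intro j hj hlt hjd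
        rcases lt_or_eq_of_le (show (j : Int) ≤ d by omega) with h | h
        · exact H j hj h hjd
        · exact hm ((PySem.Int.mod_eq_zero_iff_dvd _ _).mpr
            (by rw [← h]; exact_mod_cast hjd))
    · rw [spfLoop, dif_neg (fun hc => hg hc.2)]
      exact pv_spf_stop N d hd h1 hg H

theorem pv_spf_eq (N : ℕ) (h1 : 1 ≤ N) : spfLoop (N : Int) 2 = (N.minFac : Int) := by
  refine pv_spfLoop_eq ((N : Int) + 1 - 2).toNat N 2 (le_refl _) (by omega) h1 ?_
  intro j hj hlt
  exfalso; omega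

-- ---- 'product of three distinct primes' ↔ Squarefree ∧ three prime factors ----

theorem pv_good_iff (N : ℕ) (_h2 : 2 ≤ N) :
    (Squarefree N ∧ N.primeFactors.card = 3) ↔
    ∃ p q r : ℕ, p.Prime ∧ q.Prime ∧ r.Prime ∧ p < q ∧ q < r ∧ N = p * q * r := by
  constructor
  · rintro ⟨hsf, hcard⟩
    obtain ⟨a, b, c, hab, hac, hbc, hset⟩ := Finset.card_eq_three.mp hcard
    have hma : a ∈ N.primeFactors := by rw [hset]; simp
    have hmb : b ∈ N.primeFactors := by rw [hset]; simp
    have hmc : c ∈ N.primeFactors := by rw [hset]; simp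
    have ha := (Nat.mem_primeFactors.mp hma).1
    have hb := (Nat.mem_primeFactors.mp hmb).1
    have hc := (Nat.mem_primeFactors.mp hmc).1
    have hprod : a * b * c = N := by
      have hP := Nat.prod_primeFactors_of_squarefree hsf
      rw [hset, Finset.prod_insert (by simp [hab, hac]),
        Finset.prod_insert (by simp [hbc]), Finset.prod_singleton] at hP
      rw [mul_assoc]; exact hP
    have key : ∀ x y z : ℕ, x.Prime → y.Prime → z.Prime → x < y → y < z → x * y * z = N →
        ∃ p q r : ℕ, p.Prime ∧ q.Prime ∧ r.Prime ∧ p < q ∧ q < r ∧ N = p * q * r :=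
      fun x y z h1 h2 h3 h4 h5 h6 => ⟨x, y, z, h1, h2, h3, h4, h5, h6.symm⟩
    rcases lt_or_gt_of_ne hab with h1 | h1
    · rcases lt_or_gt_of_ne hbc with h2' | h2'
      · exact key a b c ha hb hc h1 h2' hprod
      · rcases lt_or_gt_of_ne hac with h3 | h3
        · exact key a c b ha hc hb h3 h2' (by rw [← hprod]; ring)
        · exact key c a b hc ha hb h3 h1 (by rw [← hprod]; ring)
    · rcases lt_or_gt_of_ne hac with h3 | h3
      · exact key b a c hb ha hc h1 h3 (by rw [← hprod]; ring)
      · rcases lt_or_gt_of_ne hbc with h2' | h2'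
        · exact key b c a hb hc ha h2' h3 (by rw [← hprod]; ring)
        · exact key c b a hc hb ha h2' h1 (by rw [← hprod]; ring)
  · rintro ⟨p, q, r, hp, hq, hr, hpq, hqr, hN⟩
    have hpq' : p ≠ q := by omega
    have hpr' : p ≠ r := by omega
    have hqr' : q ≠ r := by omega
    have hcopqr : Nat.Coprime q r := (Nat.coprime_primes hq hr).mpr hqr'
    have hsf : Squarefree N := by
      rw [hN, mul_assoc, Nat.squarefree_mul_iff]
      refine ⟨Nat.Coprime.mul_right ((Nat.coprime_primes hp hq).mpr hpq')
        ((Nat.coprime_primes hp hr).mpr hpr'), hp.squarefree, ?_⟩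
      rw [Nat.squarefree_mul_iff]
      exact ⟨hcopqr, hq.squarefree, hr.squarefree⟩
    refine ⟨hsf, ?_⟩
    rw [hN, Nat.primeFactors_mul (Nat.mul_pos hp.pos hq.pos).ne' hr.pos.ne',
      Nat.primeFactors_mul hp.pos.ne' hq.pos.ne',
      hp.primeFactors, hq.primeFactors, hr.primeFactors]
    have hset : ({p} ∪ {q} ∪ {r} : Finset ℕ) = {p, q, r} := by
      ext x; simp
    rw [hset]
    exact Finset.card_eq_three.mpr ⟨p, q, r, hpq', hpr', hqr', rfl⟩

-- minFac of p * m is p when every prime factor of m is ≥ p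
theorem pv_minFac_mul_eq (p m : ℕ) (hp : p.Prime) (hm1 : 1 ≤ m)
    (hm : ∀ s : ℕ, s.Prime → s ∣ m → p ≤ s) : (p * m).minFac = p := by
  apply le_antisymm
  · exact Nat.minFac_le_of_dvd hp.two_le ⟨m, rfl⟩
  · have hne1 : p * m ≠ 1 := by nlinarith [hp.two_le]
    have hf := Nat.minFac_prime hne1
    have hfd := Nat.minFac_dvd (p * m)
    rcases hf.dvd_mul.mp hfd with h | h
    · exact le_of_eq ((Nat.prime_dvd_prime_iff_eq hf hp).mp h).symm
    · exact hm _ hf h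

-- B's condition on the minFac chain ↔ Squarefree ∧ three prime factors
theorem pv_cond_iff (N : ℕ) (h2 : 2 ≤ N) :
    (N.minFac < (N / N.minFac).minFac ∧
     (N / N.minFac).minFac < (N / N.minFac) / (N / N.minFac).minFac ∧
     ((N / N.minFac) / (N / N.minFac).minFac).minFac = (N / N.minFac) / (N / N.minFac).minFac)
    ↔ (Squarefree N ∧ N.primeFactors.card = 3) := by
  rw [pv_good_iff N h2]
  constructor
  · rintro ⟨h1, h2', h3⟩
    set P := N.minFac with hPdef
    set M := N / P with hMdef
    have hP : P.Prime := Nat.minFac_prime (by omega)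
    have hPM : P * M = N := Nat.mul_div_cancel' (Nat.minFac_dvd N)
    have hM1 : 1 ≤ M := Nat.div_pos (Nat.le_of_dvd (by omega) (Nat.minFac_dvd N)) (Nat.minFac_pos N)
    set Q := M.minFac with hQdef
    have hM2 : 2 ≤ M := by
      rcases eq_or_lt_of_le hM1 with h | h
      · exfalso
        have : Q = 1 := by rw [hQdef, ← h]; exact Nat.minFac_one
        have := hP.two_le; omega
      · omega
    have hQ : Q.Prime := Nat.minFac_prime (by omega)
    set R := M / Q with hRdef
    have hQR : Q * R = M := Nat.mul_div_cancel' (Nat.minFac_dvd M)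
    have hR : R.Prime := Nat.prime_def_minFac.mpr ⟨by have := hQ.two_le; omega, h3⟩
    exact ⟨P, Q, R, hP, hQ, hR, h1, h2', by rw [← hPM, ← hQR, mul_assoc]⟩
  · rintro ⟨p, q, r, hp, hq, hr, hpq, hqr, hN⟩
    have e1 : N.minFac = p := by
      rw [hN, mul_assoc]
      refine pv_minFac_mul_eq p (q * r) hp (by nlinarith [hq.two_le, hr.two_le]) ?_
      intro s hs hsd
      rcases hs.dvd_mul.mp hsd with h | h
      · have := (Nat.prime_dvd_prime_iff_eq hs hq).mp h; omega
      · have := (Nat.prime_dvd_prime_iff_eq hs hr).mp h; omega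
    have e2 : N / p = q * r := by
      rw [hN, mul_assoc, Nat.mul_div_cancel_left _ hp.pos]
    have e3 : (q * r).minFac = q := by
      refine pv_minFac_mul_eq q r hq (by have := hr.two_le; omega) ?_
      intro s hs hsd
      have := (Nat.prime_dvd_prime_iff_eq hs hr).mp hsd; omega
    have e4 : q * r / q = r := Nat.mul_div_cancel_left _ hq.pos
    rw [e1, e2, e3, e4]
    exact ⟨hpq, hqr, (Nat.prime_def_minFac.mp hr).2⟩

-- ---- characterisation of A's loop ----

theorem pv_prime_of_no_small (N : ℕ) (i : Int) (h2 : 2 ≤ N) (hi : 2 ≤ i)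
    (hlt : (N : Int) < i * i)
    (H : ∀ j : ℕ, 2 ≤ j → (j : Int) < i → ¬ j ∣ N) : N.Prime := by
  rw [Nat.prime_def_le_sqrt]
  refine ⟨h2, fun m hm hms => ?_⟩
  have hmm : m * m ≤ N := Nat.le_sqrt.mp hms
  refine H m hm ?_
  have hmi : (m : Int) * (m : Int) ≤ (N : Int) := by exact_mod_cast hmm
  nlinarith

theorem pv_aLoop_base (N : ℕ) (i res : Int) (hi : 2 ≤ i) (h1 : 1 ≤ N)
    (H : ∀ j : ℕ, 2 ≤ j → (j : Int) < i → ¬ j ∣ N) (hstop : ¬ i * i ≤ (N : Int)) :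
    aLoop (N : Int) i res =
      if Squarefree N ∧ res + (N.primeFactors.card : Int) = 3 then 1 else 0 := by
  rw [aLoop, dif_neg (fun hc => hstop hc.2)]
  rcases eq_or_lt_of_le h1 with h | h
  · rw [← h]
    norm_num [Nat.primeFactors_one]
  · have hp : N.Prime := pv_prime_of_no_small N i (by omega) hi (by omega) H
    have hsf : Squarefree N := hp.squarefree
    have hcard : N.primeFactors.card = 1 := by rw [hp.primeFactors]; rfl
    have hgt : (N : Int) > 1 := by exact_mod_cast h
    rw [if_pos hgt, hcard]
    by_cases hres : res + 1 = 3
    · rw [if_pos hres, if_pos ⟨hsf, by push_cast; omega⟩]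
    · rw [if_neg hres, if_neg (by rintro ⟨-, hc⟩; push_cast at hc; omega)]

theorem pv_aLoop_eq (k : ℕ) : ∀ (N : ℕ) (i res : Int),
    ((N : Int) + 1 - i).toNat ≤ k → 2 ≤ i → 1 ≤ N →
    (∀ j : ℕ, 2 ≤ j → (j : Int) < i → ¬ j ∣ N) →
    aLoop (N : Int) i res =
      if Squarefree N ∧ res + (N.primeFactors.card : Int) = 3 then 1 else 0 := by
  induction k with
  | zero =>
    intro N i res hk hi h1 H
    refine pv_aLoop_base N i res hi h1 H ?_
    intro hc
    have := pv_i_le_n _ _ hi hc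
    omega
  | succ k ih =>
    intro N i res hk hi h1 H
    by_cases hg : i * i ≤ (N : Int)
    case neg => exact pv_aLoop_base N i res hi h1 H hg
    have h4 : (4 : Int) ≤ (N : Int) := by nlinarith
    have hN2 : 2 ≤ N := by exact_mod_cast (by omega : (2 : Int) ≤ (N : Int))
    rw [aLoop, dif_pos ⟨hi, hg⟩]
    by_cases hm : PySem.Int.mod (N : Int) i = 0
    · rw [if_pos hm]
      have hdvdI : i ∣ (N : Int) := (PySem.Int.mod_eq_zero_iff_dvd _ _).mp hm
      have hiI : ((i.toNat : ℕ) : Int) = i := Int.toNat_of_nonneg (by omega)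
      have hIdvd : i.toNat ∣ N := by rw [← Int.natCast_dvd_natCast, hiI]; exact hdvdI
      have hI2 : 2 ≤ i.toNat := by omega
      by_cases hres : res + 1 > 3
      · rw [if_pos hres]
        have hne : N.primeFactors.Nonempty := by
          rw [Finset.nonempty_iff_ne_empty]
          intro hc
          rw [Nat.primeFactors_eq_empty] at hc
          omega
        have hcard1 : (1 : Int) ≤ (N.primeFactors.card : Int) := by
          exact_mod_cast Finset.card_pos.mpr hne
        rw [if_neg (by rintro ⟨-, hc⟩; omega)]
      · rw [if_neg hres, pv_aInner_zero]
        have hMceq : PySem.Int.floordiv (N : Int) i = ((N / i.toNat : ℕ) : Int) := by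
          rw [← hiI]; exact PySem.Int.floordiv_natCast N i.toNat
        set I := i.toNat with hIdef
        set M := N / I with hMdef
        have hIM : I * M = N := Nat.mul_div_cancel' hIdvd
        have hM1 : 1 ≤ M := Nat.div_pos (Nat.le_of_dvd (by omega) hIdvd) (by omega)
        rw [hMceq]
        by_cases hmm : PySem.Int.mod ((M : ℕ) : Int) i = 0
        · rw [if_pos hmm]
          have hIdvdM : I ∣ M := by
            rw [← Int.natCast_dvd_natCast, hiI]
            exact (PySem.Int.mod_eq_zero_iff_dvd _ _).mp hmm
          have hnsf : ¬ Squarefree N := by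
            intro hsf
            obtain ⟨t, ht⟩ := hIdvdM
            have hsq : I * I ∣ N := ⟨t, by rw [← hIM, ht]; ring⟩
            have := hsf I hsq
            rw [Nat.isUnit_iff] at this
            omega
          rw [if_neg (by rintro ⟨hsf, -⟩; exact hnsf hsf)]
        · rw [if_neg hmm]
          have hIp : I.Prime := by
            by_contra hnp
            obtain ⟨p, hp, hpd⟩ := Nat.exists_prime_and_dvd (show I ≠ 1 by omega)
            have hplt : p < I := lt_of_le_of_ne (Nat.le_of_dvd (by omega) hpd)
              (by rintro rfl; exact hnp hp)
            refine H p hp.two_le ?_ (hpd.trans hIdvd)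
            rw [← hiI]; exact_mod_cast hplt
          have hInd : ¬ I ∣ M := fun hc => hmm ((PySem.Int.mod_eq_zero_iff_dvd _ _).mpr
            (by rw [← hiI]; exact_mod_cast hc))
          have hcop : Nat.Coprime I M := (Nat.Prime.coprime_iff_not_dvd hIp).mpr hInd
          have hsf_iff : Squarefree N ↔ Squarefree M := by
            rw [← hIM, Nat.squarefree_mul_iff]
            exact ⟨fun h => h.2.2, fun h => ⟨hcop, hIp.squarefree, h⟩⟩
          have hcard : N.primeFactors.card = M.primeFactors.card + 1 := by
            rw [← hIM, Nat.primeFactors_mul (by omega) (by omega), hIp.primeFactors,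
              Finset.singleton_union,
              Finset.card_insert_of_notMem (fun hc => hInd (Nat.mem_primeFactors.mp hc).2.1)]
          have hH' : ∀ j : ℕ, 2 ≤ j → (j : Int) < i + 1 → ¬ j ∣ M := by
            intro j hj hlt hjd
            rcases lt_or_eq_of_le (show (j : Int) ≤ i by omega) with hl | he
            · exact H j hj hl (hjd.trans ⟨I, by rw [← hIM]; ring⟩)
            · have hje : j = I := by rw [← hiI] at he; exact_mod_cast he
              exact hInd (hje ▸ hjd)
          have hMlt : M < N := Nat.div_lt_self (by omega) (by omega)
          have hMlt' : (M : Int) < (N : Int) := by exact_mod_cast hMlt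
          show aLoop ((M : ℕ) : Int) (i + 1) (res + 1) =
            if Squarefree N ∧ res + (N.primeFactors.card : Int) = 3 then 1 else 0
          rw [ih M (i + 1) (res + 1) (by omega) (by omega) hM1 hH']
          refine if_congr ?_ rfl rfl
          rw [hsf_iff, hcard]
          push_cast
          constructor <;> rintro ⟨a, b⟩ <;> exact ⟨a, by omega⟩
    · rw [if_neg hm]
      have hle := pv_i_le_n _ _ hi hg
      refine ih N (i + 1) res (by omega) (by omega) h1 ?_
      intro j hj hlt hjd
      rcases lt_or_eq_of_le (show (j : Int) ≤ i by omega) with hl | he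
      · exact H j hj hl hjd
      · exact hm ((PySem.Int.mod_eq_zero_iff_dvd _ _).mpr (by rw [← he]; exact_mod_cast hjd))

-- ---- characterisation of B ----

theorem pv_alt_eq (N : ℕ) (h2 : 2 ≤ N) :
    anlPrime_alt (N : Int) = if Squarefree N ∧ N.primeFactors.card = 3 then 1 else 0 := by
  have hlt : ¬ ((N : Int) < 2) := by exact_mod_cast not_lt.mpr (show (2 : Int) ≤ N by exact_mod_cast h2)
  simp only [anlPrime_alt, spf]
  rw [if_neg hlt]
  have hM1 : 1 ≤ N / N.minFac :=
    Nat.div_pos (Nat.le_of_dvd (by omega) (Nat.minFac_dvd N)) (Nat.minFac_pos N)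
  have hR1 : 1 ≤ (N / N.minFac) / (N / N.minFac).minFac :=
    Nat.div_pos (Nat.le_of_dvd (by omega) (Nat.minFac_dvd _)) (Nat.minFac_pos _)
  have e1 : spfLoop ((N : ℕ) : Int) 2 = ((N.minFac : ℕ) : Int) := pv_spf_eq N (by omega)
  have e2 : PySem.Int.floordiv ((N : ℕ) : Int) ((N.minFac : ℕ) : Int)
      = ((N / N.minFac : ℕ) : Int) := PySem.Int.floordiv_natCast N N.minFac
  have e3 : spfLoop ((N / N.minFac : ℕ) : Int) 2 = (((N / N.minFac).minFac : ℕ) : Int) :=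
    pv_spf_eq _ hM1
  have e4 : PySem.Int.floordiv ((N / N.minFac : ℕ) : Int) (((N / N.minFac).minFac : ℕ) : Int)
      = (((N / N.minFac) / (N / N.minFac).minFac : ℕ) : Int) :=
    PySem.Int.floordiv_natCast _ _
  have e5 : spfLoop (((N / N.minFac) / (N / N.minFac).minFac : ℕ) : Int) 2
      = ((((N / N.minFac) / (N / N.minFac).minFac).minFac : ℕ) : Int) := pv_spf_eq _ hR1
  simp only [e1, e2, e3, e4, e5]
  refine if_congr ?_ rfl rfl
  rw [Nat.cast_lt, Nat.cast_lt, Nat.cast_inj]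
  exact pv_cond_iff N h2

-- ===== VERDICT (by name: the statement is the Claim_ definition above) =====
theorem anlPrime_spec : Claim_equal_anlPrime := by
  intro n _
  unfold Spec_anlPrime anlPrime
  by_cases h2 : 2 ≤ n
  · obtain ⟨N, rfl⟩ := Int.eq_ofNat_of_zero_le (by omega : (0 : Int) ≤ n)
    have hN2 : 2 ≤ N := by exact_mod_cast h2
    rw [pv_aLoop_eq ((N : Int) + 1 - 2).toNat N 2 0 (le_refl _) (by omega) (by omega)
      (by intro j hj hlt; exfalso; omega), pv_alt_eq N hN2]
    refine if_congr ?_ rfl rfl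
    constructor <;> rintro ⟨a, b⟩ <;> exact ⟨a, by omega⟩
  · rw [aLoop, dif_neg (by rintro ⟨-, hc⟩; omega)]
    rw [if_neg (by split <;> omega)]
    unfold anlPrime_alt
    rw [if_pos (by omega)]
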